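-- pv_equiv track=rewrite | github.com/quenrythane/wall-generator | wall generator2.py | prepare_layers
-- ===== SOURCE A (Python) =====
-- brick = '[--]'
--
-- def prepare_layers(whole, in_layer):
--     layers = ['']  # start with first layer
--     last_layer = 0
--     for i in range(whole):
--         x = i // in_layer  # 0
--         if x > last_layer:  # check when i need to add next layer to wall
--             last_layer = x
--             layers.append(brick)
--         else:
--             layers[x] += brick
--     return layers[::-1]
-- ===== SOURCE B (Python) =====
-- brick = '[--]'
--
-- def prepare_layers(whole, in_layer):
--     if whole <= 0:
--         return ['']
--     n = -(-whole // in_layer)  # number of layers = ceil(whole / in_layer)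
--     return [brick * min(in_layer, whole - k * in_layer) for k in range(n - 1, -1, -1)]
-- ===== Notes on version B (the rewrite author's own statement) =====
-- stated objective: faster
-- what changed: B computes each layer's brick string directly by a closed form (brick * min(in_layer, whole - k*in_layer) for each layer index k, iterating layers back-to-front) instead of A's per-brick loop over range(whole) that appends one brick at a time and reverses at the end.
-- outside the precondition, e.g. on prepare_layers(1, -1): A returns ['[--]'], B returns []; on prepare_layers(2, -1): A returns ['[--][--]'], B returns []
import Mathlib
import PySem

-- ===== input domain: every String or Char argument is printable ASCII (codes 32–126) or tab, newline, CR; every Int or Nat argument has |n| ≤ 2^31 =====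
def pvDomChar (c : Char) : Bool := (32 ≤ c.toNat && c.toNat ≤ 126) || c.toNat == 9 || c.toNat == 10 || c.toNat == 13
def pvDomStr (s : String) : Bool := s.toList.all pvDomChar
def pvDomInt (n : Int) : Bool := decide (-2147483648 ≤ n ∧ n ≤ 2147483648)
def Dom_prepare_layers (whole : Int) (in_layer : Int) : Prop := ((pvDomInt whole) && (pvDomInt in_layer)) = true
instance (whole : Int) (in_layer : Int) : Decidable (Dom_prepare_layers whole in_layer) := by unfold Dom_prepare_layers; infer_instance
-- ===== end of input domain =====

-- B computes each layer's bricks by a closed form per layer instead of A's loop over every brick.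

-- ===== PORT A =====
def pvBrick : String := "[--]"

def prepare_layers (whole : Int) (in_layer : Int) : List String :=
  -- layers = ['']; last_layer = 0; for i in range(whole): …
  let st := (PySem.List.pyRange 0 whole 1).foldl
    (fun (s : List String × Int) i =>
      let x := PySem.Int.floordiv i in_layer
      if x > s.2 then
        (s.1 ++ [pvBrick], x)
      else
        -- layers[x] += brick  (total forms; Pre_ keeps the index in range)
        (PySem.List.pySetD s.1 x (PySem.List.pyGetD s.1 x "" ++ pvBrick), s.2))
    ([""], 0)
  -- return layers[::-1]
  (PySem.List.slice? st.1 none none (-1)).getD []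

-- ===== PORT B =====
-- Python's  s * n  (n ≤ 0 gives ""), hand-ported exactly: n-fold left-iterated concatenation
def pvStrMul (s : String) (n : Int) : String :=
  Nat.rec "" (fun _ acc => acc ++ s) n.toNat

def prepare_layers_alt (whole : Int) (in_layer : Int) : List String :=
  if whole ≤ 0 then [""]
  else
    let n := -(PySem.Int.floordiv (-whole) in_layer)
    (PySem.List.pyRange (n - 1) (-1) (-1)).map
      (fun k => pvStrMul pvBrick (min in_layer (whole - k * in_layer)))

-- ===== PRECONDITION & SPEC =====
-- Pre_ excludes in_layer ≤ 0 with whole > 0: there A either raises (ZeroDivisionError when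
-- in_layer = 0, IndexError once some i // in_layer ≤ -2) or returns a value produced by
-- accidental negative-index wraparound (layers[-1]), outside the function's natural domain
-- of a positive bricks-per-layer count.
def Pre_prepare_layers (whole : Int) (in_layer : Int) : Prop := whole ≤ 0 ∨ 1 ≤ in_layer
instance (whole : Int) (in_layer : Int) : Decidable (Pre_prepare_layers whole in_layer) := by
  unfold Pre_prepare_layers; infer_instance

def pvWitness_prepare_layers : Int × Int := (7, 3)

def Spec_prepare_layers (whole : Int) (in_layer : Int) (out : List String) : Prop :=
  out = prepare_layers_alt whole in_layer
instance (whole : Int) (in_layer : Int) (out : List String) :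
    Decidable (Spec_prepare_layers whole in_layer out) := by
  unfold Spec_prepare_layers; infer_instance

-- ===== CLAIM (what is proved, stated in full; the proofs are below) =====
def Claim_equal_prepare_layers : Prop := ∀ (whole : Int) (in_layer : Int), Dom_prepare_layers whole in_layer → Pre_prepare_layers whole in_layer → Spec_prepare_layers whole in_layer (prepare_layers whole in_layer)

-- ===== LEMMAS AND PROOFS =====

-- after c bricks have been laid in a layer, its string is pvRep c
def pvRep (c : Nat) : String := Nat.rec "" (fun _ acc => acc ++ pvBrick) c

lemma pvLoopInv (q : Nat) (hq : 1 ≤ q) (m : Nat) (hm : 1 ≤ m) :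
    (PySem.List.pyRange 0 (m : Int) 1).foldl
      (fun (s : List String × Int) i =>
        let x := PySem.Int.floordiv i (q : Int)
        if x > s.2 then (s.1 ++ [pvBrick], x)
        else (PySem.List.pySetD s.1 x (PySem.List.pyGetD s.1 x "" ++ pvBrick), s.2))
      ([""], 0)
    = ((List.range ((m - 1) / q + 1)).map (fun k => pvRep (min q (m - k * q))),
       (((m - 1) / q : Nat) : Int)) := by
  induction m with
  | zero => omega
  | succ m ih =>
    by_cases hm1 : m = 0
    · subst hm1
      norm_num
      rw [show PySem.List.pyRange 0 1 1 = [0] from by decide]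
      have h0 : PySem.Int.floordiv 0 (q:Int) = 0 := by
        simpa using PySem.Int.floordiv_natCast 0 q
      simp [h0, Nat.min_eq_right hq]
      decide
    · have hm' : 1 ≤ m := by omega
      have hq0 : 0 < q := hq
      have hcast : ((m + 1 : Nat) : Int) = (m : Int) + 1 := by push_cast; ring
      rw [hcast, PySem.List.pyRange_one_succ_right (by positivity), List.foldl_append, ih hm']
      simp only [List.foldl_cons, List.foldl_nil]
      have hx : PySem.Int.floordiv (m : Int) (q : Int) = ((m / q : Nat) : Int) :=
        PySem.Int.floordiv_natCast m q
      have hsucc : m / q = (m - 1) / q + if q ∣ m then 1 else 0 := by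
        have h2 : (m - 1 + 1) / q = (m - 1) / q + if q ∣ (m - 1 + 1) then 1 else 0 :=
          Nat.succ_div
        rwa [Nat.sub_add_cancel hm'] at h2
      have hsub : m + 1 - 1 = m := by omega
      by_cases hdvd : q ∣ m
      · have hstep : m / q = (m - 1) / q + 1 := by rw [hsucc, if_pos hdvd]
        rw [hx, if_pos (by rw [hstep]; exact_mod_cast Nat.lt_succ_self _)]
        rw [hsub, hstep]
        refine Prod.ext ?_ (by simp)
        simp only
        conv_rhs => rw [List.range_succ, List.map_append]
        congr 1
        · apply List.map_congr_left
          intro k hk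
          rw [List.mem_range] at hk
          have hk2 : (k + 1) * q ≤ m := by
            rw [← Nat.le_div_iff_mul_le hq0]; omega
          rw [Nat.add_mul, one_mul] at hk2
          exact congrArg pvRep (by omega)
        · have hLq : ((m - 1) / q + 1) * q = m := by
            rw [← hstep]; exact Nat.div_mul_cancel hdvd
          simp only [List.map_singleton, hLq, Nat.add_sub_cancel_left, Nat.min_eq_right hq]
          decide
      · have hstep : m / q = (m - 1) / q := by rw [hsucc, if_neg hdvd]; omega
        rw [hx, if_neg (by rw [hstep]; exact lt_irrefl _), hsub, hstep]
        refine Prod.ext ?_ (by simp)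
        simp only [PySem.List.pySetD_natCast, PySem.List.pyGetD_natCast]
        set d := (m - 1) / q with hd
        have hdm : q * (m / q) + m % q = m := Nat.div_add_mod m q
        have hmod : m % q < q := Nat.mod_lt m hq0
        have hdq : d * q + m % q = m := by rw [← hstep, mul_comm]; exact hdm
        have hget : ((List.range (d + 1)).map (fun k => pvRep (min q (m - k * q)))).getD d "" =
            pvRep (min q (m - d * q)) := by
          simp [List.getD]
        rw [hget, List.range_succ, List.map_append, List.map_append,
          List.set_append_right _ _ (by simp),
          List.map_singleton, List.map_singleton]
        simp only [List.length_map, List.length_range, Nat.sub_self, List.set_cons_zero]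
        congr 1
        · apply List.map_congr_left
          intro k hk
          rw [List.mem_range] at hk
          have hk2 : (k + 1) * q ≤ m := by
            rw [← Nat.le_div_iff_mul_le hq0]; omega
          rw [Nat.add_mul, one_mul] at hk2
          exact congrArg pvRep (by omega)
        · have harg1 : min q (m - d * q) = m % q := by omega
          have harg2 : min q (m + 1 - d * q) = m % q + 1 := by omega
          rw [harg1, harg2]
          rfl

theorem prepare_layers_spec : Claim_equal_prepare_layers := by
  intro whole q hdom hpre
  unfold Spec_prepare_layers prepare_layers prepare_layers_alt
  by_cases hw : whole ≤ 0
  · rw [if_pos hw, PySem.List.pyRange_one_eq_nil hw]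
    simp [PySem.List.slice?_none_none_neg_one]
  · rw [if_neg hw]
    have hq1 : (1 : Int) ≤ q := hpre.resolve_left hw
    obtain ⟨w, rfl⟩ : ∃ w : Nat, whole = (w : Int) := ⟨whole.toNat, by omega⟩
    obtain ⟨q', rfl⟩ : ∃ Q : Nat, q = (Q : Int) := ⟨q.toNat, by omega⟩
    have hw1 : 1 ≤ w := by exact_mod_cast not_le.mp hw
    have hq'1 : 1 ≤ q' := by exact_mod_cast hq1
    simp only
    rw [pvLoopInv q' hq'1 w hw1]
    simp only [PySem.List.slice?_none_none_neg_one, Option.getD_some]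
    set D : Nat := (w - 1) / q' with hD
    have hdmod : q' * D + (w - 1) % q' = w - 1 := by rw [hD]; exact Nat.div_add_mod _ _
    have hmlt : (w - 1) % q' < q' := Nat.mod_lt _ (by omega)
    have hceil : -(PySem.Int.floordiv (-(w : Int)) (q' : Int)) = ((D + 1 : Nat) : Int) := by
      rw [PySem.Int.neg_floordiv_neg_eq_iff_of_pos (by exact_mod_cast hq'1)]
      have hle : D * q' ≤ w - 1 := Nat.div_mul_le_self _ _
      have hlt : w ≤ (D + 1) * q' := by
        have e : (D + 1) * q' = q' * D + q' := by ring
        rw [e]; omega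
      constructor
      · have h1 : D * q' < w := by omega
        calc (((D + 1 : Nat) : Int) - 1) * (q' : Int) = ((D * q' : Nat) : Int) := by
              push_cast; ring
          _ < (w : Int) := by exact_mod_cast h1
      · calc (w : Int) ≤ (((D + 1) * q' : Nat) : Int) := by exact_mod_cast hlt
          _ = ((D + 1 : Nat) : Int) * (q' : Int) := by push_cast; ring
    rw [hceil, PySem.List.pyRange_neg_one_eq_reverse]
    have h01 : (-1 : Int) + 1 = 0 := by norm_num
    have hN1 : ((D + 1 : Nat) : Int) - 1 + 1 = ((D + 1 : Nat) : Int) := by ring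
    rw [h01, hN1, List.map_reverse]
    congr 1
    rw [PySem.List.pyRange_zero_natCast, List.map_map]
    apply List.map_congr_left
    intro k hk
    rw [List.mem_range] at hk
    have hk2 : k * q' ≤ w - 1 := (Nat.le_div_iff_mul_le (by omega)).mp (by omega)
    have hc : ((k * q' : Nat) : Int) = (k : Int) * (q' : Int) := by push_cast; ring
    show pvRep (min q' (w - k * q')) = pvRep (min (q' : Int) ((w : Int) - (k : Int) * (q' : Int))).toNat
    congr 1
    rw [← hc]
    omega
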